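-- pv_equiv track=rewrite | github.com/choboss00/Baekjoon | 백준/Silver/12852. 1로 만들기 2/1로 만들기 2.py | bfs
-- ===== SOURCE A (Python) =====
-- from collections import deque
-- from copy import deepcopy
--
-- def bfs(n):
--     queue = deque()
--
--     visited = [False for _ in range(n+1)]
--
--     queue.append([n, 0, [n]])
--
--     while queue:
--         x, cnt, sub_list = queue.popleft()
--
--         if x == 1:
--             return cnt, sub_list
--
--         if x % 3 == 0 and not visited[x // 3]:
--             l_3 = deepcopy(sub_list)
--             l_3.append(x // 3)
--             queue.append([x // 3, cnt + 1, l_3])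
--             visited[x // 3] = True
--         if x % 2 == 0 and not visited[x // 2]:
--             l_2 = deepcopy(sub_list)
--             l_2.append(x // 2)
--             queue.append([x // 2, cnt + 1, l_2])
--             visited[x // 2] = True
--         if not visited[x - 1]:
--             l_1 = deepcopy(sub_list)
--             l_1.append(x - 1)
--             queue.append([x - 1, cnt + 1, l_1])
--             visited[x - 1] = True
-- ===== SOURCE B (Python) =====
-- from collections import deque
--
-- def bfs(n):
--     # Parent-pointer BFS: O(1) state per node; the path is rebuilt once at the end
--     # instead of deep-copying a list per enqueue.
--     parent = {n: None}
--     queue = deque([n])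
--     while queue:
--         x = queue.popleft()
--         if x == 1:
--             path = []
--             t = x
--             while t is not None:
--                 path.append(t)
--                 t = parent[t]
--             path.reverse()
--             return len(path) - 1, path
--         if x % 3 == 0 and x // 3 not in parent:
--             parent[x // 3] = x
--             queue.append(x // 3)
--         if x % 2 == 0 and x // 2 not in parent:
--             parent[x // 2] = x
--             queue.append(x // 2)
--         if x - 1 not in parent:
--             parent[x - 1] = x
--             queue.append(x - 1)
-- ===== Notes on version B (the rewrite author's own statement) =====
-- stated objective: alternative
-- what changed: Replaces A's BFS that deep-copies the whole path list into every queue entry with a parent-pointer BFS (dict node -> predecessor) that stores O(1) per discovered node and reconstructs the path once when the target is dequeued.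
-- outside the precondition, e.g. on bfs(0): A returns None, B does not finish within the time limit; on bfs(-1): A raises IndexError, B does not finish within the time limit
import Mathlib
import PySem

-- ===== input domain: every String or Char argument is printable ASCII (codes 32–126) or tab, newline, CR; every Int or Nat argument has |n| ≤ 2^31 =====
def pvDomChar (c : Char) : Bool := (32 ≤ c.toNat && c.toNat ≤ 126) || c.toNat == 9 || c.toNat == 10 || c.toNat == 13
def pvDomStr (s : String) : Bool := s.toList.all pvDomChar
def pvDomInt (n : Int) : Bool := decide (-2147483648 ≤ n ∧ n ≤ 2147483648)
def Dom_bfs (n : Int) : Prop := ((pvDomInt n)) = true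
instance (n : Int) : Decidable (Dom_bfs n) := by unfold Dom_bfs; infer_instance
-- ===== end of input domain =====

-- B replaces A's deep-copied per-node path lists with a parent-pointer dict and rebuilds
-- the path once at the end; same BFS order, so the same (count, path) is returned.

-- ===== PORT A =====
-- visited[i] (read): exact for 0 ≤ i < len, the only indices reached when 1 ≤ n
-- (out of range Python raises IndexError; such inputs are excluded by Pre_).
def vget (v : List Bool) (i : Int) : Bool := (PySem.List.pyGet? v i).getD true

-- visited[i] = True: PySem's total form of list assignment, exact under InRange (always here).
def vset (v : List Bool) (i : Int) : List Bool := PySem.List.pySetD v i true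

-- the while loop; fuel n+2 bounds the pops (each node enqueued once), never exhausted when 1 ≤ n
def bfsLoop (fuel : Nat) (v : List Bool) (q : List (Int × Int × List Int)) : Int × List Int :=
  match fuel with
  | 0 => (0, [])
  | fuel + 1 =>
    match q with
    | [] => (0, [])             -- Python falls off the loop and returns None: excluded by Pre_
    | (x, cnt, sub) :: rest =>
      if x = 1 then (cnt, sub)
      else
        let y3 := PySem.Int.floordiv x 3
        let g3 := (PySem.Int.mod x 3 == 0) && !(vget v y3)
        let v3 := if g3 then vset v y3 else v
        let q3 := if g3 then rest ++ [(y3, cnt + 1, sub ++ [y3])] else rest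
        let y2 := PySem.Int.floordiv x 2
        let g2 := (PySem.Int.mod x 2 == 0) && !(vget v3 y2)
        let v2 := if g2 then vset v3 y2 else v3
        let q2 := if g2 then q3 ++ [(y2, cnt + 1, sub ++ [y2])] else q3
        let g1 := !(vget v2 (x - 1))
        let v1 := if g1 then vset v2 (x - 1) else v2
        let q1 := if g1 then q2 ++ [(x - 1, cnt + 1, sub ++ [x - 1])] else q2
        bfsLoop fuel v1 q1

def bfs (n : Int) : Int × List Int :=
  bfsLoop (n.toNat + 2) (List.replicate (n + 1).toNat false) [(n, 0, [n])]

-- ===== PORT B =====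
-- path reconstruction: follow parent pointers from 1 back up to n (strictly increasing,
-- hence at most n+2 hops); parent[t] missing never happens along a recorded chain.
def rebuildLoop (fuel : Nat) (p : PySem.Dict Int (Option Int)) (t : Option Int) (path : List Int) : List Int :=
  match fuel, t with
  | 0, _ => path
  | _ + 1, none => path
  | fuel + 1, some z => rebuildLoop fuel p ((p.get? z).getD none) (path ++ [z])

def bfsAltLoop (n : Int) (fuel : Nat) (p : PySem.Dict Int (Option Int)) (q : List Int) : Int × List Int :=
  match fuel with
  | 0 => (0, [])
  | fuel + 1 =>
    match q with
    | [] => (0, [])             -- Python falls off the loop and returns None: excluded by Pre_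
    | x :: rest =>
      if x = 1 then
        let path := (rebuildLoop (n.toNat + 2) p (some x) []).reverse
        ((path.length : Int) - 1, path)
      else
        let y3 := PySem.Int.floordiv x 3
        let g3 := (PySem.Int.mod x 3 == 0) && !(p.contains y3)
        let p3 := if g3 then p.insert y3 (some x) else p
        let q3 := if g3 then rest ++ [y3] else rest
        let y2 := PySem.Int.floordiv x 2
        let g2 := (PySem.Int.mod x 2 == 0) && !(p3.contains y2)
        let p2 := if g2 then p3.insert y2 (some x) else p3
        let q2 := if g2 then q3 ++ [y2] else q3
        let g1 := !(p2.contains (x - 1))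
        let p1 := if g1 then p2.insert (x - 1) (some x) else p2
        let q1 := if g1 then q2 ++ [x - 1] else q2
        bfsAltLoop n fuel p1 q1

def bfs_alt (n : Int) : Int × List Int :=
  bfsAltLoop n (n.toNat + 2) (PySem.Dict.empty.insert n none) [n]

-- ===== PRECONDITION & SPEC =====
-- Pre_ excludes n ≤ 0: for n = 0 Python A falls off the loop and returns None (not an
-- Int × List value), and for n < 0 it raises IndexError on the empty visited list.
def Pre_bfs (n : Int) : Prop := 1 ≤ n
instance (n : Int) : Decidable (Pre_bfs n) := by unfold Pre_bfs; infer_instance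
def pvWitness_bfs : Int := (10)

def Spec_bfs (n : Int) (out : Int × List Int) : Prop := out = bfs_alt n
instance (n : Int) (out : Int × List Int) : Decidable (Spec_bfs n out) := by unfold Spec_bfs; infer_instance

-- ===== CLAIM (what is proved, stated in full; the proofs are below) =====
def Claim_equal_bfs : Prop := ∀ (n : Int), Dom_bfs n → Pre_bfs n → Spec_bfs n (bfs n)

-- ===== LEMMAS AND PROOFS =====

-- `Chain p y s`: s is the path n, …, y recorded by the parent pointers in p
inductive Chain (p : PySem.Dict Int (Option Int)) : Int → List Int → Prop where
  | root (x : Int) : p.get? x = some none → Chain p x [x]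
  | step (x y : Int) (s : List Int) : p.get? y = some (some x) → Chain p x s → Chain p y (s ++ [y])

-- invariant of one queue entry: A's (x, cnt, sub) corresponds to B's node x
def EntX (n : Int) (p : PySem.Dict Int (Option Int)) (x c : Int) (s : List Int) : Prop :=
  1 ≤ x ∧ x ≤ n ∧ Chain p x s ∧ c = (s.length : Int) - 1 ∧
    s.IsChain (· > ·) ∧ ∀ z ∈ s, 1 ≤ z ∧ z ≤ n

def Ent (n : Int) (p : PySem.Dict Int (Option Int)) (e : Int × Int × List Int) (y : Int) : Prop :=
  e.1 = y ∧ EntX n p y e.2.1 e.2.2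

-- the lockstep invariant of the two loops
def StInv (n : Int) (v : List Bool) (p : PySem.Dict Int (Option Int))
    (qA : List (Int × Int × List Int)) (qB : List Int) : Prop :=
  v.length = (n + 1).toNat ∧ (∀ i : Int, 0 ≤ i → i < n → vget v i = p.contains i) ∧
    List.Forall₂ (Ent n p) qA qB

lemma chain_insert {p : PySem.Dict Int (Option Int)} {y k : Int} {s : List Int}
    {w : Option Int} (h : Chain p y s) (hk : p.contains k = false) :
    Chain (p.insert k w) y s := by
  induction h with
  | root x hx =>
    refine Chain.root x ?_
    rw [PySem.Dict.get?_insert_of_ne]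
    · exact hx
    · intro hxy; subst hxy
      rw [PySem.Dict.contains_eq_isSome_get?, hx] at hk; simp at hk
  | step x y s hy hx ih =>
    refine Chain.step x y s ?_ ih
    rw [PySem.Dict.get?_insert_of_ne]
    · exact hy
    · intro hxy; subst hxy
      rw [PySem.Dict.contains_eq_isSome_get?, hy] at hk; simp at hk

lemma chain_last {p : PySem.Dict Int (Option Int)} {y : Int} {s : List Int}
    (h : Chain p y s) : s.getLast? = some y := by
  cases h with
  | root x hx => rfl
  | step x y s hy hx => simp

lemma entx_insert {n x c k : Int} {p : PySem.Dict Int (Option Int)} {s : List Int}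
    {w : Option Int} (h : EntX n p x c s) (hk : p.contains k = false) :
    EntX n (p.insert k w) x c s :=
  ⟨h.1, h.2.1, chain_insert h.2.2.1 hk, h.2.2.2⟩

lemma forall₂_insert {n k : Int} {p : PySem.Dict Int (Option Int)} {w : Option Int}
    {qA : List (Int × Int × List Int)} {qB : List Int}
    (h : List.Forall₂ (Ent n p) qA qB) (hk : p.contains k = false) :
    List.Forall₂ (Ent n (p.insert k w)) qA qB :=
  List.Forall₂.imp (fun _ _ he => ⟨he.1, entx_insert he.2 hk⟩) h

lemma rebuild_correct {p : PySem.Dict Int (Option Int)} {y : Int} {s : List Int}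
    (h : Chain p y s) : ∀ (f : Nat) (acc : List Int), s.length ≤ f →
      rebuildLoop f p (some y) acc = acc ++ s.reverse := by
  induction h with
  | root x hx =>
    intro f acc hf
    match f, hf with
    | f + 1, _ =>
      show rebuildLoop f p ((p.get? x).getD none) (acc ++ [x]) = acc ++ [x]
      rw [hx]
      cases f <;> rfl
  | step x y s hy hx ih =>
    intro f acc hf
    simp only [List.length_append, List.length_cons, List.length_nil] at hf
    match f, hf with
    | f + 1, hf =>
      show rebuildLoop f p ((p.get? y).getD none) (acc ++ [y]) = acc ++ (s ++ [y]).reverse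
      rw [hy]
      show rebuildLoop f p (some x) (acc ++ [y]) = acc ++ (s ++ [y]).reverse
      rw [ih f (acc ++ [y]) (by omega)]
      simp

lemma len_le_of_chain' {n : Int} {s : List Int} (hd : s.IsChain (· > ·))
    (hb : ∀ z ∈ s, 1 ≤ z ∧ z ≤ n) : s.length ≤ n.toNat := by
  have hpw : s.Pairwise (· > ·) := hd.pairwise
  have hnd : s.Nodup := hpw.imp (fun {a b} h => by omega)
  calc s.length = s.toFinset.card := (List.toFinset_card_of_nodup hnd).symm
    _ ≤ (Finset.Icc (1 : Int) n).card := by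
        apply Finset.card_le_card
        intro z hz
        rw [List.mem_toFinset] at hz
        rw [Finset.mem_Icc]
        exact hb z hz
    _ = n.toNat := by rw [Int.card_Icc]; omega

lemma vget_eq_getElem? {v : List Bool} {i : Int} (h0 : 0 ≤ i) :
    vget v i = (v[i.toNat]?).getD true := by
  rw [vget, PySem.List.pyGet?_of_nonneg v h0]

lemma vset_length {v : List Bool} {i : Int} : (vset v i).length = v.length := by
  rw [vset, PySem.List.length_pySetD]

lemma vget_vset {v : List Bool} {i j : Int} (h0 : 0 ≤ i) (hl : i.toNat < v.length)
    (hj : 0 ≤ j) :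
    vget (vset v i) j = if j = i then true else vget v j := by
  rw [vset, PySem.List.pySetD_of_nonneg v true h0, vget_eq_getElem? hj, vget_eq_getElem? hj,
    List.getElem?_set]
  split_ifs with h1 h2 h2
  · simp
  · omega
  · omega
  · rfl

lemma vget_replicate {m : Nat} {i : Int} (h0 : 0 ≤ i) (h : i.toNat < m) :
    vget (List.replicate m false) i = false := by
  rw [vget_eq_getElem? h0, List.getElem?_replicate]
  simp [h]

-- one conditional enqueue step, performed in lockstep by the two loops
lemma step_pres {n x y c : Int} {s : List Int} {v : List Bool}
    {p : PySem.Dict Int (Option Int)} {qA : List (Int × Int × List Int)} {qB : List Int}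
    (cond : Bool)
    (hlen : v.length = (n + 1).toNat)
    (hvis : ∀ i : Int, 0 ≤ i → i < n → vget v i = p.contains i)
    (hF : List.Forall₂ (Ent n p) qA qB)
    (hx : EntX n p x c s)
    (hy : cond = true → 1 ≤ y ∧ y < x) :
    (cond && !(vget v y)) = (cond && !(p.contains y)) ∧
    ((if (cond && !(p.contains y)) then vset v y else v).length = (n + 1).toNat) ∧
    (∀ i : Int, 0 ≤ i → i < n →
        vget (if (cond && !(p.contains y)) then vset v y else v) i =
        (if (cond && !(p.contains y)) then p.insert y (some x) else p).contains i) ∧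
    List.Forall₂ (Ent n (if (cond && !(p.contains y)) then p.insert y (some x) else p))
        (if (cond && !(p.contains y)) then qA ++ [(y, c + 1, s ++ [y])] else qA)
        (if (cond && !(p.contains y)) then qB ++ [y] else qB) ∧
    EntX n (if (cond && !(p.contains y)) then p.insert y (some x) else p) x c s := by
  cases cond with
  | false => simpa using ⟨hlen, hvis, hF, hx⟩
  | true =>
    obtain ⟨hy1, hyx⟩ := hy rfl
    have hyn : y < n := by have := hx.2.1; omega
    have hvy : vget v y = p.contains y := hvis y (by omega) hyn
    refine ⟨by rw [hvy], ?_⟩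
    cases hg : p.contains y with
    | true => simpa [hg] using ⟨hlen, hvis, hF, hx⟩
    | false =>
      simp only [Bool.true_and, Bool.not_false, if_true]
      refine ⟨by rw [vset_length, hlen], ?_, ?_, entx_insert hx hg⟩
      · intro i hi0 hin
        rw [vget_vset (by omega) (by omega) hi0, PySem.Dict.contains_insert]
        by_cases hiy : i = y
        · simp [hiy]
        · simp only [if_neg hiy]
          rw [hvis i hi0 hin]
          simp [hiy]
      · refine List.rel_append (forall₂_insert hF hg) ?_
        refine List.forall₂_cons.mpr ⟨?_, List.Forall₂.nil⟩
        obtain ⟨hx1, hxn, hch, hc', hdec, hbnd⟩ := hx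
        refine ⟨rfl, hy1, by omega, ?_, ?_, ?_, ?_⟩
        · exact Chain.step x y s (PySem.Dict.get?_insert_self p y (some x)) (chain_insert hch hg)
        · simp; omega
        · rw [List.isChain_append]
          refine ⟨hdec, List.isChain_singleton y, ?_⟩
          intro a ha b hb
          rw [chain_last hch] at ha
          simp at ha hb
          omega
        · intro z hz
          rcases List.mem_append.mp hz with h | h
          · exact hbnd z h
          · simp at h; omega

lemma loop_eq (fuel : Nat) : ∀ (n : Int) (v : List Bool) (p : PySem.Dict Int (Option Int))
    (qA : List (Int × Int × List Int)) (qB : List Int),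
    StInv n v p qA qB → bfsLoop fuel v qA = bfsAltLoop n fuel p qB := by
  induction fuel with
  | zero => intro n v p qA qB _; rfl
  | succ f ih =>
    intro n v p qA qB hst
    obtain ⟨hlen, hvis, hF⟩ := hst
    cases hF with
    | nil => rfl
    | cons he hF' =>
      rename_i e y qA' qB'
      obtain ⟨x, c, s⟩ := e
      obtain ⟨hxy, hx⟩ := he
      simp only at hxy
      subst hxy
      show bfsLoop (f + 1) v ((x, c, s) :: qA') = bfsAltLoop n (f + 1) p (x :: qB')
      by_cases hx1 : x = 1
      · subst hx1
        obtain ⟨_, _, hch, hc', hdec, hbnd⟩ := hx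
        have hlens : s.length ≤ n.toNat + 2 :=
          le_trans (len_le_of_chain' hdec hbnd) (by omega)
        simp only [bfsLoop, bfsAltLoop, if_true]
        rw [rebuild_correct hch (n.toNat + 2) [] hlens]
        simp only [List.nil_append, List.reverse_reverse]
        refine Prod.ext_iff.mpr ⟨?_, rfl⟩
        show c = (s.length : Int) - 1
        omega
      · have hx2 : 2 ≤ x := by have := hx.1; omega
        simp only [bfsLoop, bfsAltLoop, if_neg hx1]
        -- step 1: x // 3
        have hy3 : (PySem.Int.mod x 3 == 0) = true → 1 ≤ PySem.Int.floordiv x 3 ∧ PySem.Int.floordiv x 3 < x := by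
          intro h
          have hm : PySem.Int.mod x 3 = 0 := by simpa using h
          have := PySem.Int.floordiv_mul_add_mod x 3
          rw [hm] at this
          omega
        obtain ⟨hg3, hlen3, hvis3, hF3, hx3⟩ :=
          step_pres (PySem.Int.mod x 3 == 0) hlen hvis hF' hx hy3
        rw [hg3]
        -- step 2: x // 2
        have hy2 : (PySem.Int.mod x 2 == 0) = true → 1 ≤ PySem.Int.floordiv x 2 ∧ PySem.Int.floordiv x 2 < x := by
          intro h
          have hm : PySem.Int.mod x 2 = 0 := by simpa using h
          have := PySem.Int.floordiv_mul_add_mod x 2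
          rw [hm] at this
          omega
        obtain ⟨hg2, hlen2, hvis2, hF2, hx2'⟩ :=
          step_pres (PySem.Int.mod x 2 == 0) hlen3 hvis3 hF3 hx3 hy2
        rw [hg2]
        -- step 3: x - 1
        have hy1 : (true : Bool) = true → 1 ≤ x - 1 ∧ x - 1 < x := fun _ => by omega
        obtain ⟨hg1, hlen1, hvis1, hF1, _⟩ :=
          step_pres true hlen2 hvis2 hF2 hx2' hy1
        simp only [Bool.true_and] at hg1 hlen1 hvis1 hF1
        rw [hg1]
        exact ih n _ _ _ _ ⟨hlen1, hvis1, hF1⟩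

lemma init_inv (n : Int) (h1 : 1 ≤ n) :
    StInv n (List.replicate (n + 1).toNat false) (PySem.Dict.empty.insert n none)
      [(n, 0, [n])] [n] := by
  refine ⟨by simp, ?_, ?_⟩
  · intro i hi0 hin
    rw [vget_replicate hi0 (by omega), PySem.Dict.contains_insert]
    simp only [PySem.Dict.contains_empty]
    have : i ≠ n := by omega
    simp [this]
  · refine List.forall₂_cons.mpr ⟨?_, List.Forall₂.nil⟩
    refine ⟨rfl, h1, le_refl n, ?_, by simp, List.isChain_singleton n, ?_⟩
    · exact Chain.root n (PySem.Dict.get?_insert_self PySem.Dict.empty n none)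
    · intro z hz; simp at hz; omega

-- ===== VERDICT (by name: the statement is the Claim_ definition above) =====
theorem bfs_spec : Claim_equal_bfs := by
  intro n _ hpre
  show bfs n = bfs_alt n
  exact loop_eq (n.toNat + 2) n _ _ _ _ (init_inv n hpre)
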